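-- pv_equiv track=rewrite | github.com/pypi-data/pypi-mirror-323 | packages/polyllm/polyllm-1.0.5-py3-none-any.whl/polyllm/providers/gbnf/utils/errors/build_error_position.py | build_error_position
-- ===== SOURCE A (Python) =====
-- MAXIMUM_NUMBER_OF_ERROR_LINES_TO_SHOW = 3
--
-- def build_error_position(src: str, pos: int) -> list[str]:
--     if src == "":
--         return [
--             "No input provided",
--         ]
--
--     if pos >= len(src):
--         lines = src.splitlines()
--         if lines and lines[-1]:
--             return [lines[-1], " " * len(lines[-1]) + "^"]
--         elif lines:
--             return [lines[-1], "^"]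
--         else:
--             return ["^"]
--
--     lines = src.splitlines(keepends=True) # Keep the newline characters
--     line_idx = 0
--     current_pos = 0
--     error_line = None
--
--     for i, line in enumerate(lines):
--         if current_pos <= pos < current_pos + len(line):
--             line_idx = i
--             error_line = line
--             break
--         current_pos += len(line)
--
--     if error_line is None:
--         # This should ideally not happen if the initial check is correct
--         return ["Error position outside of source"]
--
--     # ... (rest of the function to extract surrounding lines and add the '^')
--     start_line = max(0, line_idx - (MAXIMUM_NUMBER_OF_ERROR_LINES_TO_SHOW - 1))
--     end_line = line_idx + 1
--     lines_to_show = [lines[i].rstrip('\n') for i in range(start_line, end_line) if i < len(lines)]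
--
--     offset = pos - (sum(len(l) for l in lines[:line_idx]))
--
--     return [
--         *lines_to_show,
--         " " * offset + "^",
--     ]
-- ===== SOURCE B (Python) =====
-- from bisect import bisect_right
-- from itertools import accumulate
--
-- MAXIMUM_NUMBER_OF_ERROR_LINES_TO_SHOW = 3
--
-- def build_error_position(src: str, pos: int) -> list[str]:
--     if src == "":
--         return ["No input provided"]
--
--     if pos >= len(src):
--         last = src.splitlines()[-1]
--         return [last, " " * len(last) + "^"]
--
--     if pos < 0:
--         return ["Error position outside of source"]
--
--     lines = src.splitlines(keepends=True)
--     # table of line-start offsets + binary search instead of a linear scan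
--     starts = [0, *accumulate(len(line) for line in lines)]
--     line_idx = bisect_right(starts, pos) - 1
--     offset = pos - starts[line_idx]
--
--     start_line = max(0, line_idx - (MAXIMUM_NUMBER_OF_ERROR_LINES_TO_SHOW - 1))
--     window = [line.rstrip('\n') for line in lines[start_line:line_idx + 1]]
--     return [*window, " " * offset + "^"]
-- ===== Notes on version B (the rewrite author's own statement) =====
-- stated objective: alternative
-- what changed: Replaces the enumerate-scan-and-break over keepends lines (plus a re-summing of prefix lengths for the offset) with a prefix-sum table of line-start offsets and a bisect_right binary search; window and pointer construction, and the unreachable-None and out-of-range branches, are folded into direct expressions.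
import Mathlib
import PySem

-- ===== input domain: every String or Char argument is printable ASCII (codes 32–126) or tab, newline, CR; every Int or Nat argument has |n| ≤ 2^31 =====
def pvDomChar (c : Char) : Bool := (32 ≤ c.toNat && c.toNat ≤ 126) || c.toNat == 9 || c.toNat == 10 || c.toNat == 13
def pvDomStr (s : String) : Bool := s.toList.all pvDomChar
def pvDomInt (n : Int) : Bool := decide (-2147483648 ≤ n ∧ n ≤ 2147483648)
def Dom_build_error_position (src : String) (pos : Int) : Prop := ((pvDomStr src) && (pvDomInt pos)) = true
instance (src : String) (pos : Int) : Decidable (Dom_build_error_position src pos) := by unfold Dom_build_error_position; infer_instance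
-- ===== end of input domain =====

-- B replaces A's enumerate-scan-and-break (plus a second prefix-length summation for the offset)
-- by a prefix-sum table of line-start offsets queried with bisect_right (alternative decomposition, same cost).

-- ===== PORT A =====
-- shared helper: src.splitlines(keepends=True); exact on the Dom alphabet, where the only
-- line breaks are '\n', '\r' and '\r\n' (both Pythons call this same builtin)
def splitKeep : List Char → List (List Char)
  | [] => []
  | '\r' :: '\n' :: rest => ['\r', '\n'] :: splitKeep rest
  | '\r' :: rest => ['\r'] :: splitKeep rest
  | '\n' :: rest => ['\n'] :: splitKeep rest
  | c :: rest =>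
    match splitKeep rest with
    | [] => [[c]]
    | l :: ls => (c :: l) :: ls

-- shared helper: line.rstrip('\n') — drop every trailing '\n' (both Pythons call it)
def rstripNl (l : List Char) : List Char := (l.reverse.dropWhile (· == '\n')).reverse

-- A's scan loop (enumerate + break): 'some i' ↔ error_line was set to lines[i]
def findLoop : List (List Char) → Nat → Int → Int → Option Nat
  | [], _, _, _ => none
  | l :: rest, i, cur, pos =>
    if cur ≤ pos ∧ pos < cur + (l.length : Int) then some i
    else findLoop rest (i + 1) (cur + (l.length : Int)) pos

def build_error_position (src : String) (pos : Int) : List String :=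
  if src.toList = [] then ["No input provided"]
  else if pos ≥ (src.toList.length : Int) then
    -- 'if lines and lines[-1]': lines[-1] is only read with lines nonempty, so getD is exact
    if PySem.Chars.splitlines src.toList ≠ [] ∧
        PySem.List.pyGetD (PySem.Chars.splitlines src.toList) (-1) [] ≠ [] then
      [String.ofList (PySem.List.pyGetD (PySem.Chars.splitlines src.toList) (-1) []),
       String.ofList (PySem.List.pyRepeat [' ']
         ((PySem.List.pyGetD (PySem.Chars.splitlines src.toList) (-1) []).length : Int) ++ ['^'])]
    else if PySem.Chars.splitlines src.toList ≠ [] then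
      [String.ofList (PySem.List.pyGetD (PySem.Chars.splitlines src.toList) (-1) []),
       String.ofList ['^']]
    else [String.ofList ['^']]
  else
    match findLoop (splitKeep src.toList) 0 0 pos with
    | none => ["Error position outside of source"]
    | some i =>
      (((PySem.List.pyRange (max 0 ((i : Int) - 2)) ((i : Int) + 1) 1).filter
          (fun j => decide (j < ((splitKeep src.toList).length : Int)))).map
          (fun j => rstripNl (PySem.List.pyGetD (splitKeep src.toList) j []))).map String.ofList
      ++ [String.ofList (PySem.List.pyRepeat [' ']
            (pos - ((PySem.List.slice (splitKeep src.toList) none (some (i : Int))).map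
              (fun l => (l.length : Int))).sum) ++ ['^'])]

-- ===== PORT B =====
-- port of [0, *itertools.accumulate(lens)] : the table of line-start offsets
def startsOf (lens : List Int) : List Int :=
  (List.range (lens.length + 1)).map fun k => (lens.take k).sum

def build_error_position_alt (src : String) (pos : Int) : List String :=
  if src.toList = [] then ["No input provided"]
  else if pos ≥ (src.toList.length : Int) then
    -- lines[-1]: splitlines of a nonempty string is nonempty, so getD is exact here
    [String.ofList (PySem.List.pyGetD (PySem.Chars.splitlines src.toList) (-1) []),
     String.ofList (PySem.List.pyRepeat [' ']
       ((PySem.List.pyGetD (PySem.Chars.splitlines src.toList) (-1) []).length : Int) ++ ['^'])]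
  else if pos < 0 then ["Error position outside of source"]
  else
    -- line_idx = bisect_right(starts, pos) - 1; bisect_right ≥ 1 here (starts[0] = 0 ≤ pos),
    -- so Nat subtraction agrees with Python's int '-'; starts[line_idx] is in range, so getD is exact
    ((PySem.List.slice (splitKeep src.toList)
        (some (max 0 (((PySem.List.bisectRight
          (startsOf ((splitKeep src.toList).map fun l => (l.length : Int))) pos - 1 : Nat) : Int) - 2)))
        (some (((PySem.List.bisectRight
          (startsOf ((splitKeep src.toList).map fun l => (l.length : Int))) pos - 1 : Nat) : Int) + 1))).map
        rstripNl).map String.ofList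
    ++ [String.ofList (PySem.List.pyRepeat [' ']
          (pos - (startsOf ((splitKeep src.toList).map fun l => (l.length : Int))).getD
            (PySem.List.bisectRight
              (startsOf ((splitKeep src.toList).map fun l => (l.length : Int))) pos - 1) 0) ++ ['^'])]

-- ===== PRECONDITION & SPEC =====
def Spec_build_error_position (src : String) (pos : Int) (out : List String) : Prop :=
  out = build_error_position_alt src pos
instance (src : String) (pos : Int) (out : List String) : Decidable (Spec_build_error_position src pos out) := by
  unfold Spec_build_error_position; infer_instance

-- ===== CLAIM (what is proved, stated in full; the proofs are below) =====
def Claim_equal_build_error_position : Prop := ∀ (src : String) (pos : Int),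
  Dom_build_error_position src pos → Spec_build_error_position src pos (build_error_position src pos)

-- ===== LEMMAS AND PROOFS =====

-- prefix-length sum of the first k split lines, as an Int
def psum (ls : List (List Char)) (k : Nat) : Int :=
  ((ls.take k).map (fun l => (l.length : Int))).sum

theorem splitKeep_flatten (cs : List Char) : (splitKeep cs).flatten = cs := by
  fun_induction splitKeep cs with
  | case1 => rfl
  | case2 rest ih => simpa using ih
  | case3 rest h ih => simpa using ih
  | case4 rest ih => simpa using ih
  | case5 c rest h1 h2 h3 hnil ih =>
    rw [hnil] at ih
    simp only [List.flatten_nil] at ih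
    subst ih
    simp
  | case6 c rest h1 h2 h3 l ls hcons ih =>
    rw [hcons] at ih
    simpa using congrArg (c :: ·) ih

theorem splitlines_go_ne_nil (isB : Char → Bool) (s cur : List Char) (acc : List (List Char))
    (h : s ≠ [] ∨ cur ≠ [] ∨ acc ≠ []) : PySem.Chars.splitlines.go isB s cur acc ≠ [] := by
  fun_induction PySem.Chars.splitlines.go isB s cur acc with
  | case1 cur acc hemp =>
    rcases h with h | h | h
    · exact absurd rfl h
    · exact absurd (List.isEmpty_iff.mp hemp) h
    · simpa using h
  | case2 cur acc hemp => simp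
  | case3 rest cur acc ih => exact ih (Or.inr (Or.inr (by simp)))
  | case4 c rest cur acc hx hB ih => exact ih (Or.inr (Or.inr (by simp)))
  | case5 c rest cur acc hx hB ih => exact ih (Or.inr (Or.inl (by simp)))

theorem splitlines_ne_nil (cs : List Char) (h : cs ≠ []) : PySem.Chars.splitlines cs ≠ [] :=
  splitlines_go_ne_nil _ cs [] [] (Or.inl h)

theorem findLoop_none (ls : List (List Char)) (i : Nat) (cur pos : Int) (h : pos < cur) :
    findLoop ls i cur pos = none := by
  induction ls generalizing i cur with
  | nil => rfl
  | cons l rest ih =>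
    have h0 : (0 : Int) ≤ (l.length : Int) := Int.natCast_nonneg _
    simp only [findLoop]
    rw [if_neg (by omega)]
    exact ih (i + 1) (cur + (l.length : Int)) (by omega)

theorem findLoop_found (ls : List (List Char)) (i : Nat) (cur pos : Int)
    (h1 : cur ≤ pos) (h2 : pos < cur + ((ls.map fun l => (l.length : Int)).sum)) :
    ∃ j, findLoop ls i cur pos = some (i + j) ∧ j < ls.length ∧
      psum ls j ≤ pos - cur ∧ pos - cur < psum ls (j + 1) := by
  induction ls generalizing i cur with
  | nil => simp at h2; omega
  | cons l rest ih =>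
    have hps : ∀ m : Nat, psum (l :: rest) (m + 1) = (l.length : Int) + psum rest m := by
      intro m; simp [psum, List.take_succ_cons]
    by_cases hc : cur ≤ pos ∧ pos < cur + (l.length : Int)
    · refine ⟨0, by simp [findLoop, hc], by simp, ?_, ?_⟩
      · simp [psum]; omega
      · rw [show (0 + 1 : Nat) = 0 + 1 from rfl, hps 0]
        simp [psum]; omega
    · have hge : cur + (l.length : Int) ≤ pos := by
        rcases not_and_or.mp hc with h | h <;> omega
      have h2' : pos < (cur + (l.length : Int)) + ((rest.map fun l => (l.length : Int)).sum) := by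
        simp at h2; omega
      obtain ⟨j, hf, hlt, hlo, hhi⟩ := ih (i + 1) (cur + (l.length : Int)) hge h2'
      refine ⟨j + 1, ?_, by simpa using hlt, ?_, ?_⟩
      · simp only [findLoop, if_neg hc]
        rw [hf]; congr 1; omega
      · rw [hps j]; omega
      · rw [hps (j + 1)]; omega

theorem sum_take_mono (xs : List Int) (h0 : ∀ x ∈ xs, 0 ≤ x) {a b : Nat} (hab : a ≤ b) :
    (xs.take a).sum ≤ (xs.take b).sum := by
  have hsub : List.Sublist (xs.take a) (xs.take b) := by
    have := List.take_sublist a (xs.take b)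
    rwa [List.take_take, Nat.min_eq_left hab] at this
  exact List.Sublist.sum_le_sum hsub (fun x hx => h0 x (List.mem_of_mem_take hx))

theorem psum_mono (ls : List (List Char)) {a b : Nat} (hab : a ≤ b) : psum ls a ≤ psum ls b := by
  have := sum_take_mono (ls.map fun l => (l.length : Int)) (by simp) hab
  simpa [psum, List.map_take] using this

theorem psum_unique (ls : List (List Char)) (r : Int) (j j' : Nat)
    (h1 : psum ls j ≤ r) (h2 : r < psum ls (j + 1))
    (h3 : psum ls j' ≤ r) (h4 : r < psum ls (j' + 1)) : j = j' := by
  rcases Nat.lt_trichotomy j j' with h | h | h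
  · have := psum_mono ls (show j + 1 ≤ j' from h); omega
  · exact h
  · have := psum_mono ls (show j' + 1 ≤ j from h); omega

theorem startsOf_length (lens : List Int) : (startsOf lens).length = lens.length + 1 := by
  simp [startsOf]

theorem startsOf_getElem (lens : List Int) (k : Nat) (h : k < lens.length + 1) :
    (startsOf lens)[k]'(by rw [startsOf_length]; exact h) = (lens.take k).sum := by
  unfold startsOf
  rw [List.getElem_map, List.getElem_range]

theorem startsOf_pairwise (lens : List Int) (h0 : ∀ x ∈ lens, 0 ≤ x) :
    List.Pairwise (fun x1 x2 => x1 ≤ x2) (startsOf lens) := by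
  rw [List.pairwise_iff_getElem]
  intro a b ha hb hab
  rw [startsOf_length] at ha hb
  rw [startsOf_getElem lens a ha, startsOf_getElem lens b hb]
  exact sum_take_mono lens h0 (Nat.le_of_lt hab)

theorem map_len_sum (ls : List (List Char)) :
    (ls.map fun l => (l.length : Int)).sum = (((ls.map List.length).sum : Nat) : Int) := by
  induction ls with
  | nil => simp
  | cons l t ih => simp [ih]

-- the total prefix sum is the length of the source
theorem psum_total (cs : List Char) :
    ((splitKeep cs).map fun l => (l.length : Int)).sum = (cs.length : Int) := by
  rw [map_len_sum]
  exact congrArg _ (by rw [← List.length_flatten, splitKeep_flatten])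

theorem build_error_position_spec : Claim_equal_build_error_position := by
  intro src pos _
  unfold Spec_build_error_position build_error_position build_error_position_alt
  by_cases h0 : src.toList = []
  · rw [if_pos h0, if_pos h0]
  rw [if_neg h0, if_neg h0]
  by_cases h1 : pos ≥ (src.toList.length : Int)
  · rw [if_pos h1, if_pos h1]
    have hne := splitlines_ne_nil src.toList h0
    by_cases h2 : PySem.List.pyGetD (PySem.Chars.splitlines src.toList) (-1) [] = []
    · rw [if_neg (by simp [h2]), if_pos hne]
      simp [h2, PySem.List.pyRepeat_singleton]
    · rw [if_pos ⟨hne, h2⟩]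
  rw [if_neg h1, if_neg h1]
  by_cases hneg : pos < 0
  · rw [if_pos hneg]
    simp only [findLoop_none (splitKeep src.toList) 0 0 pos hneg]
  rw [if_neg hneg]
  -- main branch: 0 ≤ pos < len(src)
  set ls := splitKeep src.toList with hls
  have htot : ((ls.map fun l => (l.length : Int)).sum) = (src.toList.length : Int) := psum_total src.toList
  have hposlt : pos < 0 + ((ls.map fun l => (l.length : Int)).sum) := by omega
  obtain ⟨j, hf, hjlt, hlo, hhi⟩ := findLoop_found ls 0 0 pos (by omega) hposlt
  simp only [Nat.zero_add] at hf
  simp only [hf]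
  simp only [Int.sub_zero] at hlo hhi
  -- analyse bisect_right
  set lens := ls.map fun l => (l.length : Int) with hlens
  set starts := startsOf lens with hstarts
  have hlenstarts : starts.length = ls.length + 1 := by
    rw [hstarts, startsOf_length, hlens, List.length_map]
  have hpw : List.Pairwise (fun x1 x2 => x1 ≤ x2) starts :=
    startsOf_pairwise lens (by simp [hlens])
  obtain ⟨hk1, hk2, hk3⟩ := PySem.List.bisectRight_spec starts pos hpw
  set k := PySem.List.bisectRight starts pos with hk
  have hgetEq : ∀ (m : Nat) (hm : m < starts.length), starts[m] = psum ls m := by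
    intro m hm
    have hlenlens : lens.length = ls.length := by rw [hlens, List.length_map]
    have hm' : m < lens.length + 1 := by omega
    have h1' : psum ls m = (lens.take m).sum := by
      rw [hlens]; simp only [psum, List.map_take]
    rw [h1']
    exact startsOf_getElem lens m hm'
  have hn : ls.length < starts.length := by omega
  have hstn : starts[ls.length] = (src.toList.length : Int) := by
    rw [hgetEq ls.length hn]
    unfold psum
    rw [List.take_length]
    rw [← hlens]; exact htot
  have hkub : k ≤ ls.length := by
    by_contra hgt
    have : starts[ls.length] ≤ pos := hk2 ls.length hn (by omega)
    omega
  have hklb : 1 ≤ k := by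
    by_contra hlt
    have h00 : (0 : Nat) < starts.length := by omega
    have hx : pos < starts[0] := hk3 0 h00 (by omega)
    have hy : starts[0] = psum ls 0 := hgetEq 0 h00
    simp [psum] at hy
    omega
  have hidx1 : psum ls (k - 1) ≤ pos := by
    have hklen : k - 1 < starts.length := by omega
    have := hk2 (k - 1) hklen (by omega)
    rwa [hgetEq (k - 1) hklen] at this
  have hidx2 : pos < psum ls ((k - 1) + 1) := by
    have hklen : k < starts.length := by omega
    have := hk3 k hklen (le_refl k)
    rw [hgetEq k hklen] at this
    have hke : (k - 1) + 1 = k := by omega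
    rwa [hke]
  have hjk : j = k - 1 := psum_unique ls pos j (k - 1) hlo hhi hidx1 hidx2
  rw [← hjk]
  -- offsets agree
  have hoffA : ((PySem.List.slice ls none (some (j : Int))).map fun l => (l.length : Int)).sum
      = psum ls j := by
    rw [PySem.List.slice_to_natCast]
    unfold psum
    rfl
  have hoffB : starts.getD j 0 = psum ls j := by
    have hklen : j < starts.length := by omega
    rw [List.getD_eq_getElem starts 0 hklen]
    exact hgetEq j hklen
  -- windows agree
  have hwin : ((PySem.List.pyRange (max 0 ((j : Int) - 2)) ((j : Int) + 1) 1).filter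
        (fun t => decide (t < (ls.length : Int)))).map
        (fun t => rstripNl (PySem.List.pyGetD ls t []))
      = (PySem.List.slice ls (some (max 0 ((j : Int) - 2))) (some ((j : Int) + 1))).map rstripNl := by
    have ha0 : (0 : Int) ≤ max 0 ((j : Int) - 2) := le_max_left _ _
    have hfilter : (PySem.List.pyRange (max 0 ((j : Int) - 2)) ((j : Int) + 1) 1).filter
        (fun t => decide (t < (ls.length : Int))) =
        PySem.List.pyRange (max 0 ((j : Int) - 2)) ((j : Int) + 1) 1 := by
      rw [List.filter_eq_self]
      intro t ht
      rw [PySem.List.mem_pyRange_one] at ht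
      simp only [decide_eq_true_eq]
      have : (j : Int) < (ls.length : Int) := by exact_mod_cast hjlt
      omega
    rw [hfilter]
    have htake : ∀ t ∈ PySem.List.pyRange (max 0 ((j : Int) - 2)) ((j : Int) + 1) 1,
        PySem.List.pyGetD ls t [] = PySem.List.pyGetD (ls.take (j + 1)) t [] := by
      intro t ht
      rw [PySem.List.mem_pyRange_one] at ht
      have ht0 : 0 ≤ t := le_trans ha0 ht.1
      have htl : t < (ls.length : Int) := by
        have : (j : Int) < (ls.length : Int) := by exact_mod_cast hjlt
        omega
      rw [PySem.List.pyGetD_eq_getElem ls [] ht0 (by omega),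
          PySem.List.pyGetD_eq_getElem (ls.take (j + 1)) []  ht0
            (by rw [List.length_take]; push_cast; omega)]
      rw [List.getElem_take]
    have hlen2 : ((ls.take (j + 1)).length : Int) = (j : Int) + 1 := by
      rw [List.length_take]; push_cast; omega
    calc ((PySem.List.pyRange (max 0 ((j : Int) - 2)) ((j : Int) + 1) 1).map
            (fun t => rstripNl (PySem.List.pyGetD ls t [])))
        = ((PySem.List.pyRange (max 0 ((j : Int) - 2)) ((j : Int) + 1) 1).map
            (fun t => PySem.List.pyGetD (ls.take (j + 1)) t [])).map rstripNl := by
          rw [List.map_map]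
          exact List.map_congr_left (fun t ht => by
            simp only [Function.comp_apply]
            rw [htake t ht])
      _ = ((ls.take (j + 1)).drop (max 0 ((j : Int) - 2)).toNat).map rstripNl := by
          rw [← hlen2]
          rw [show ((ls.take (j + 1)).length : Int) = PySem.List.len (ls.take (j + 1)) from rfl]
          rw [PySem.List.map_pyGetD_pyRange (ls.take (j + 1)) [] ha0]
      _ = (PySem.List.slice ls (some (max 0 ((j : Int) - 2))) (some ((j : Int) + 1))).map rstripNl := by
          have hnt : ((j : Int) + 1).toNat = j + 1 := by omega
          rw [PySem.List.slice_toNat ls (by omega) (by omega), List.drop_take, hnt]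
  rw [hwin, hoffA, hoffB]
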